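-- pv_equiv track=rewrite | github.com/katrine-lombardo/practice | python/phone_call.py | solution
-- ===== SOURCE A (Python) =====
-- def solution(min1, min2_10, min11, s):
--     balance = s - min1
--     if balance < 0:
--         return 0
--
--     # First minute
--     minute_tracker = 1
--
--     # Minutes 2 - 10
--     for minute in range(2, 11):
--         if balance >= min2_10:
--             minute_tracker += 1
--             balance -= min2_10
--         else:
--             break
--
--     # Minutes 11+
--     if balance > 0 and minute_tracker >= 10:
--         remaining_minutes = balance // min11
--         minute_tracker += remaining_minutes
--
--     return minute_tracker
-- ===== SOURCE B (Python) =====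
-- def solution(min1, min2_10, min11, s):
--     balance = s - min1
--     if balance < 0:
--         return 0
--     n = 9 if min2_10 <= 0 else min(9, balance // min2_10)
--     balance -= n * min2_10
--     if n == 9 and balance > 0:
--         return 10 + balance // min11
--     return 1 + n
-- ===== Notes on version B (the rewrite author's own statement) =====
-- stated objective: simpler
-- what changed: Replaced A's 9-iteration subtraction loop for minutes 2-10 with direct floor-division arithmetic (n = min(9, balance // min2_10), with n = 9 when min2_10 <= 0 since the loop never stops then).
import Mathlib
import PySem

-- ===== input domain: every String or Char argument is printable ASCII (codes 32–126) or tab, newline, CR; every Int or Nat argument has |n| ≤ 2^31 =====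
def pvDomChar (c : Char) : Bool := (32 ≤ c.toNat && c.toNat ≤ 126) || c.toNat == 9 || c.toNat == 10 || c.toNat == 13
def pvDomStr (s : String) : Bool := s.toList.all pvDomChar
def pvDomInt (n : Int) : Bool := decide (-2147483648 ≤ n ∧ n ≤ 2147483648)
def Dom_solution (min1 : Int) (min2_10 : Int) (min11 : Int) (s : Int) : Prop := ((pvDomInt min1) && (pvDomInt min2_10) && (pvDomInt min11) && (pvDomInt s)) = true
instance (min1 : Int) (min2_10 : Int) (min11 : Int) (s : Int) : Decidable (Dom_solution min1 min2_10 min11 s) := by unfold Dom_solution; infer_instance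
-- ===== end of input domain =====

-- B replaces A's 9-step subtraction loop by direct floor-division arithmetic (objective: simpler).

-- ===== PORT A =====
-- the 'for minute in range(2, 11)' loop with its break, fuel = number of remaining iterations;
-- state = (minute_tracker, balance)
def solLoopA (m : Int) : Nat → Int → Int → Int × Int
  | 0, t, b => (t, b)
  | k+1, t, b => if b ≥ m then solLoopA m k (t + 1) (b - m) else (t, b)

def solution (min1 : Int) (min2_10 : Int) (min11 : Int) (s : Int) : Int :=
  let balance := s - min1
  if balance < 0 then 0
  else
    let tb := solLoopA min2_10 9 1 balance
    if tb.2 > 0 ∧ tb.1 ≥ 10 then tb.1 + PySem.Int.floordiv tb.2 min11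
    else tb.1

-- ===== PORT B =====
def solution_alt (min1 : Int) (min2_10 : Int) (min11 : Int) (s : Int) : Int :=
  let balance := s - min1
  if balance < 0 then 0
  else
    let n : Int := if min2_10 ≤ 0 then 9 else min 9 (PySem.Int.floordiv balance min2_10)
    let balance2 := balance - n * min2_10
    if n = 9 ∧ balance2 > 0 then 10 + PySem.Int.floordiv balance2 min11
    else 1 + n

-- ===== PRECONDITION & SPEC =====
-- Pre_ excludes exactly the inputs where A raises ZeroDivisionError: min11 = 0 while the
-- minutes-11+ branch is reached, i.e. s - min1 ≥ 0 and s - min1 > 9 * min2_10.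
def Pre_solution (min1 : Int) (min2_10 : Int) (min11 : Int) (s : Int) : Prop :=
  min11 ≠ 0 ∨ s - min1 < 0 ∨ s - min1 ≤ 9 * min2_10
instance (min1 : Int) (min2_10 : Int) (min11 : Int) (s : Int) : Decidable (Pre_solution min1 min2_10 min11 s) := by unfold Pre_solution; infer_instance

def pvWitness_solution : Int × Int × Int × Int := (3, 2, 1, 30)

def Spec_solution (min1 : Int) (min2_10 : Int) (min11 : Int) (s : Int) (out : Int) : Prop := out = solution_alt min1 min2_10 min11 s
instance (min1 : Int) (min2_10 : Int) (min11 : Int) (s : Int) (out : Int) : Decidable (Spec_solution min1 min2_10 min11 s out) := by unfold Spec_solution; infer_instance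

-- ===== CLAIM (what is proved, stated in full; the proofs are below) =====
def Claim_equal_solution : Prop := ∀ (min1 : Int) (min2_10 : Int) (min11 : Int) (s : Int), Dom_solution min1 min2_10 min11 s → Pre_solution min1 min2_10 min11 s → Spec_solution min1 min2_10 min11 s (solution min1 min2_10 min11 s)

-- ===== LEMMAS AND PROOFS =====

-- with a nonpositive charge the loop never breaks: all k iterations run
theorem solLoopA_nonpos (m : Int) (hm : m ≤ 0) :
    ∀ (k : Nat) (t b : Int), m ≤ b → solLoopA m k t b = (t + k, b - k * m) := by
  intro k
  induction k with
  | zero => intro t b _; simp [solLoopA]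
  | succ k ih =>
    intro t b hb
    rw [solLoopA, if_pos hb, ih (t + 1) (b - m) (by omega)]
    simp only [Prod.mk.injEq]
    refine ⟨by push_cast; ring, by push_cast; ring⟩

-- with a positive charge the loop runs min k (b // m) times
theorem solLoopA_pos (m : Int) (hm : 0 < m) :
    ∀ (k : Nat) (t b : Int), 0 ≤ b →
      solLoopA m k t b = (t + min (k : Int) (b / m), b - min (k : Int) (b / m) * m) := by
  intro k
  induction k with
  | zero =>
    intro t b hb
    have h := Int.ediv_nonneg hb (le_of_lt hm)
    have hmin0 : min ((0 : Nat) : Int) (b / m) = 0 := by push_cast; omega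
    rw [solLoopA, hmin0]
    simp
  | succ k ih =>
    intro t b hb
    by_cases hbm : b ≥ m
    · rw [solLoopA, if_pos hbm, ih (t + 1) (b - m) (by omega)]
      have hdiv : (b - m) / m = b / m - 1 := by
        have := Int.add_mul_ediv_right b (-1) (ne_of_gt hm)
        have heq : b + -1 * m = b - m := by ring
        rw [heq] at this; omega
      have hone : 1 ≤ b / m := by
        rw [Int.le_ediv_iff_mul_le hm]; omega
      rw [hdiv]
      have hmin : min ((k : Int)) (b / m - 1) + 1 = min ((k + 1 : Nat) : Int) (b / m) := by
        push_cast; omega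
      simp only [Prod.mk.injEq]
      refine ⟨by omega, by rw [← hmin]; ring⟩
    · have hz : b / m = 0 := Int.ediv_eq_zero_of_lt hb (by omega)
      have hz2 : min (((k : Int)) + 1) (b / m) = 0 := by rw [hz]; omega
      rw [solLoopA, if_neg hbm]
      push_cast
      rw [hz2]
      simp

-- ===== VERDICT (by name: the statement is the Claim_ definition above) =====
theorem solution_spec : Claim_equal_solution := by
  intro min1 m min11 s _ _
  unfold Spec_solution solution solution_alt
  by_cases h0 : s - min1 < 0
  · simp [h0]
  · have hb0 : 0 ≤ s - min1 := by omega
    simp only [if_neg h0]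
    by_cases hm : m ≤ 0
    · rw [solLoopA_nonpos m hm 9 1 (s - min1) (by omega)]
      simp only [if_pos hm]
      norm_num
    · have hmpos : 0 < m := by omega
      rw [solLoopA_pos m hmpos 9 1 (s - min1) hb0]
      rw [PySem.Int.floordiv_eq_ediv_of_pos hmpos]
      simp only [if_neg hm]
      have hq0 : 0 ≤ (s - min1) / m := Int.ediv_nonneg hb0 (le_of_lt hmpos)
      set q : Int := min ((9 : Nat) : Int) ((s - min1) / m) with hq
      have hq9 : min (9 : Int) ((s - min1) / m) = q := by rw [hq]; norm_num
      rw [hq9]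
      set p : Int := q * m with hp
      have hqle : q ≤ 9 := by rw [hq]; omega
      split_ifs with h1 h2 h2
      · obtain ⟨ha, hb⟩ := h1
        have hq9' : q = 9 := by omega
        rw [hq9']; norm_num
      · exfalso; obtain ⟨ha, hb⟩ := h1
        exact h2 ⟨by omega, ha⟩
      · exfalso; obtain ⟨ha, hb⟩ := h2
        exact h1 ⟨hb, by omega⟩
      · ring
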